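-- pv_equiv track=rewrite | github.com/rynald0cst0ltziam/Beal-Conjecture-Diophantine-Engine | hyper_goliath/scripts/cross_validate.py | get_python_survivors
-- ===== SOURCE A (Python) =====
-- import math
--
-- def get_python_survivors(x, y, z, A_max, B_max):
--     """Run Python sieve and return set of survivor pairs."""
--     prune_mods = [2, 3, 5, 7, 11, 13, 17, 19, 23, 29, 31, 37, 41, 43, 47, 53, 59, 61, 67, 71]
--     res_z_sets = [{pow(r, z, m) for r in range(m)} for m in prune_mods]
--
--     survivors = set()
--     for A in range(1, A_max + 1):
--         for B in range(1, B_max + 1):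
--             if math.gcd(A, B) > 1:
--                 continue
--
--             killed = False
--             for i, m in enumerate(prune_mods):
--                 s_mod = (pow(A, x, m) + pow(B, y, m)) % m
--                 if s_mod not in res_z_sets[i]:
--                     killed = True
--                     break
--
--             if not killed:
--                 survivors.add((A, B))
--     return survivors
-- ===== SOURCE B (Python) =====
-- import math
--
-- PRUNE_MODS = [2, 3, 5, 7, 11, 13, 17, 19, 23, 29, 31, 37, 41, 43, 47, 53, 59, 61, 67, 71]
--
-- def get_python_survivors(x, y, z, A_max, B_max):
--     """Staged sieve: start from all coprime pairs, then one filtering pass per modulus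
--     using per-base residue dictionaries, so pow() is called once per base per modulus."""
--     pairs = [(a, b)
--              for a in range(1, A_max + 1)
--              for b in range(1, B_max + 1)
--              if math.gcd(a, b) == 1]
--     for m in PRUNE_MODS:
--         allowed = {pow(r, z, m) for r in range(m)}
--         ra = {a: pow(a, x, m) for a, _ in pairs}
--         rb = {b: pow(b, y, m) for _, b in pairs}
--         pairs = [(a, b) for (a, b) in pairs if (ra[a] + rb[b]) % m in allowed]
--     return set(pairs)
-- ===== Notes on version B (the rewrite author's own statement) =====
-- stated objective: alternative
-- what changed: A tests each coprime pair against all 20 moduli in an inner loop with early break; B inverts the loops into a staged sieve: it materialises the coprime pairs once, then runs one filtering pass per modulus, building per-base residue dictionaries so pow() is called once per base per modulus instead of once per pair per modulus; similar measured speed, so no speed claim.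
import Mathlib
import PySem

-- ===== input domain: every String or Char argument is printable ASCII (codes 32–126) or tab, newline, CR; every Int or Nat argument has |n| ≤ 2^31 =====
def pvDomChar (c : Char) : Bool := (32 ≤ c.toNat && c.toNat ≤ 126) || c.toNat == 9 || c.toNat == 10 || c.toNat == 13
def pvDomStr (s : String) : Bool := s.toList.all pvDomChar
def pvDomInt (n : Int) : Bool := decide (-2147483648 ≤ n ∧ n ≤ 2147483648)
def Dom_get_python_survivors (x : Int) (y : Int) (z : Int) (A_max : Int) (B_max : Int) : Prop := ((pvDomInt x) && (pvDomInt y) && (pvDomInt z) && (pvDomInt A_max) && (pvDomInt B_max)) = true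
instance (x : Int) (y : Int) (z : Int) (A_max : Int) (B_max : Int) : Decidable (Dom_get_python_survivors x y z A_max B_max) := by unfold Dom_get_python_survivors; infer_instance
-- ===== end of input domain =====

-- B inverts the loops: it builds the coprime pairs once, then runs one filtering pass per prune
-- modulus with per-base residue dictionaries (a genuinely different staged-sieve decomposition;
-- similar measured speed, objective 'alternative').

-- ===== PORT A =====
-- prune_mods (same literal list in both Pythons)
def pvMods : List Int := [2, 3, 5, 7, 11, 13, 17, 19, 23, 29, 31, 37, 41, 43, 47, 53, 59, 61, 67, 71]

-- Python's built-in pow(b, e, m) for 0 ≤ e, m > 0, 0 ≤ b: square-and-multiply, exact there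
def pvPowN (b : Int) (e : Nat) (m : Int) : Int :=
  if h : e = 0 then 1 % m
  else
    let r := pvPowN ((b * b) % m) (e / 2) m
    if e % 2 = 1 then (r * b) % m else r
termination_by e
decreasing_by exact Nat.div_lt_self (Nat.pos_of_ne_zero h) Nat.one_lt_two

-- pow(b, e, m); a negative e is only reached inside Pre_ with base b = 1, where pow(1, e, m) = 1 % m — exact there
def pvPow (b : Int) (e : Int) (m : Int) : Int :=
  if e < 0 then 1 % m else pvPowN b e.toNat m

-- res_z_sets = [{pow(r, z, m) for r in range(m)} for m in prune_mods]
def pvResZ (z : Int) : List (PySem.Set Int) :=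
  pvMods.map (fun m => PySem.Set.ofList ((PySem.List.pyRange 0 m 1).map (fun r => pvPow r z m)))

-- 'for i, m in enumerate(prune_mods): … res_z_sets[i] …' is ported as a zip of the two
-- parallel lists (exact: res_z_sets has exactly one entry per modulus, in order)
def get_python_survivors (x : Int) (y : Int) (z : Int) (A_max : Int) (B_max : Int) : List (Int × Int) :=
  let sets := pvResZ z
  (PySem.List.pyRange 1 (A_max + 1) 1).foldl (fun survivors A =>
    (PySem.List.pyRange 1 (B_max + 1) 1).foldl (fun survivors B =>
      if 1 < Int.gcd A B then survivors
      else
        let killed := (pvMods.zip sets).any (fun ms =>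
          ! PySem.Set.contains ms.2 ((pvPow A x ms.1 + pvPow B y ms.1) % ms.1))
        if killed then survivors else PySem.Set.add survivors (A, B)) survivors)
    PySem.Set.empty

-- ===== PORT B =====
-- [(a,b) for a in range(1,A_max+1) for b in range(1,B_max+1) if gcd(a,b)==1]
-- then one filtering pass per modulus; the dict comprehensions {k: pow(k,e,m) for (k,_) in pairs}
-- are ported as foldl of Dict.insert in the same iteration order, lookups via getD
def get_python_survivors_alt (x : Int) (y : Int) (z : Int) (A_max : Int) (B_max : Int) : List (Int × Int) :=
  let pairs0 := (PySem.List.pyRange 1 (A_max + 1) 1).flatMap (fun a =>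
      ((PySem.List.pyRange 1 (B_max + 1) 1).filter (fun b => Int.gcd a b = 1)).map (fun b => (a, b)))
  let pairsF := pvMods.foldl (fun pairs m =>
      let allowed := PySem.Set.ofList ((PySem.List.pyRange 0 m 1).map (fun r => pvPow r z m))
      let ra := pairs.foldl (fun d p => PySem.Dict.insert d p.1 (pvPow p.1 x m)) PySem.Dict.empty
      let rb := pairs.foldl (fun d p => PySem.Dict.insert d p.2 (pvPow p.2 y m)) PySem.Dict.empty
      pairs.filter (fun p =>
        PySem.Set.contains allowed ((PySem.Dict.getD ra p.1 0 + PySem.Dict.getD rb p.2 0) % m)))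
    pairs0
  PySem.Set.ofList pairsF

-- ===== PRECONDITION & SPEC =====
-- Pre_ excludes exactly the inputs where Python's pow(base, negative_exponent, m) is reached with a base
-- that is not invertible modulo some prune modulus, on which A raises ValueError: z < 0 always raises
-- (res_z_sets takes pow(0, z, 2)); x < 0 raises iff the pair (2,1) is reached, y < 0 iff (1,2) is reached.
def Pre_get_python_survivors (x : Int) (y : Int) (z : Int) (A_max : Int) (B_max : Int) : Prop :=
  0 ≤ z ∧ (0 ≤ x ∨ A_max ≤ 1 ∨ B_max ≤ 0) ∧ (0 ≤ y ∨ A_max ≤ 0 ∨ B_max ≤ 1)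
instance (x : Int) (y : Int) (z : Int) (A_max : Int) (B_max : Int) : Decidable (Pre_get_python_survivors x y z A_max B_max) := by unfold Pre_get_python_survivors; infer_instance

def pvWitness_get_python_survivors : Int × Int × Int × Int × Int := (2, 3, 5, 6, 6)

def Spec_get_python_survivors (x : Int) (y : Int) (z : Int) (A_max : Int) (B_max : Int) (out : List (Int × Int)) : Prop := out = get_python_survivors_alt x y z A_max B_max
instance (x : Int) (y : Int) (z : Int) (A_max : Int) (B_max : Int) (out : List (Int × Int)) : Decidable (Spec_get_python_survivors x y z A_max B_max out) := by unfold Spec_get_python_survivors; infer_instance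

-- ===== CLAIM =====
def Claim_equal_get_python_survivors : Prop := ∀ (x : Int) (y : Int) (z : Int) (A_max : Int) (B_max : Int), Dom_get_python_survivors x y z A_max B_max → Pre_get_python_survivors x y z A_max B_max → Spec_get_python_survivors x y z A_max B_max (get_python_survivors x y z A_max B_max)

-- ===== LEMMAS AND PROOFS =====

-- the pass-m test both sides reduce to
def pvOk (x y z : Int) (m : Int) (p : Int × Int) : Bool :=
  PySem.Set.contains (PySem.Set.ofList ((PySem.List.pyRange 0 m 1).map (fun r => pvPow r z m)))
    ((pvPow p.1 x m + pvPow p.2 y m) % m)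

-- the common normal form of both ports
def pvCanon (x y z : Int) (A_max B_max : Int) : List (Int × Int) :=
  (PySem.List.pyRange 1 (A_max + 1) 1).flatMap (fun a =>
    ((PySem.List.pyRange 1 (B_max + 1) 1).filter
      (fun b => decide (Int.gcd a b = 1) && pvMods.all (fun m => pvOk x y z m (a, b)))).map (fun b => (a, b)))

theorem pv_zip_map_self {α β : Type} (l : List α) (f : α → β) :
    l.zip (l.map f) = l.map (fun a => (a, f a)) := by
  induction l with
  | nil => rfl
  | cons a t ih => simp [ih]

-- dict lookup lemmas for the comprehension {key p : f (key p) for p in l}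
theorem pv_getD_foldl_insert_not_mem (l : List (Int × Int)) (key : Int × Int → Int)
    (f : Int → Int) (d : PySem.Dict Int Int) (a : Int) (h : a ∉ l.map key) :
    PySem.Dict.getD (l.foldl (fun d p => PySem.Dict.insert d (key p) (f (key p))) d) a 0
      = PySem.Dict.getD d a 0 := by
  induction l generalizing d with
  | nil => rfl
  | cons p t ih =>
    simp only [List.map_cons, List.mem_cons, not_or] at h
    simp only [List.foldl_cons, ih _ h.2, PySem.Dict.getD_insert, if_neg h.1]

theorem pv_getD_foldl_insert_mem (l : List (Int × Int)) (key : Int × Int → Int)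
    (f : Int → Int) (d : PySem.Dict Int Int) (a : Int) (h : a ∈ l.map key) :
    PySem.Dict.getD (l.foldl (fun d p => PySem.Dict.insert d (key p) (f (key p))) d) a 0 = f a := by
  induction l generalizing d with
  | nil => simp at h
  | cons p t ih =>
    simp only [List.foldl_cons]
    by_cases ht : a ∈ t.map key
    · exact ih _ ht
    · simp only [List.map_cons, List.mem_cons] at h
      rcases h with h | h
      · rw [pv_getD_foldl_insert_not_mem t key f _ a ht, h,
          PySem.Dict.getD_insert, if_pos rfl]
      · exact absurd h ht

-- one staged pass over m equals a plain filter by pvOk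
theorem pv_pass_eq (x y z m : Int) (pairs : List (Int × Int)) :
    (pairs.filter (fun p =>
      PySem.Set.contains
        (PySem.Set.ofList ((PySem.List.pyRange 0 m 1).map (fun r => pvPow r z m)))
        ((PySem.Dict.getD
            (pairs.foldl (fun d p => PySem.Dict.insert d p.1 (pvPow p.1 x m)) PySem.Dict.empty) p.1 0
          + PySem.Dict.getD
            (pairs.foldl (fun d p => PySem.Dict.insert d p.2 (pvPow p.2 y m)) PySem.Dict.empty) p.2 0) % m)))
    = pairs.filter (fun p => pvOk x y z m p) := by
  apply List.filter_congr
  intro p hp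
  have h1 : PySem.Dict.getD
      (pairs.foldl (fun d p => PySem.Dict.insert d p.1 (pvPow p.1 x m)) PySem.Dict.empty) p.1 0
      = pvPow p.1 x m :=
    pv_getD_foldl_insert_mem pairs Prod.fst (fun a => pvPow a x m) _ p.1
      (List.mem_map_of_mem hp)
  have h2 : PySem.Dict.getD
      (pairs.foldl (fun d p => PySem.Dict.insert d p.2 (pvPow p.2 y m)) PySem.Dict.empty) p.2 0
      = pvPow p.2 y m :=
    pv_getD_foldl_insert_mem pairs Prod.snd (fun a => pvPow a y m) _ p.2
      (List.mem_map_of_mem hp)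
  rw [h1, h2]
  rfl

-- a fold of filtering passes is one filter by the conjunction
theorem pv_foldl_filter (mods : List Int) (q : Int → (Int × Int) → Bool)
    (pairs : List (Int × Int)) :
    mods.foldl (fun ps m => ps.filter (q m)) pairs
      = pairs.filter (fun p => mods.all (fun m => q m p)) := by
  induction mods generalizing pairs with
  | nil => simp
  | cons m t ih =>
    simp only [List.foldl_cons, ih, List.filter_filter, List.all_cons]
    apply List.filter_congr
    intro p _
    rw [Bool.and_comm]

-- A's inner loop over b: appends the surviving (a, b) in order
theorem pv_inner_fold (bs : List Int) (P : Int → Bool) (a : Int)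
    (acc : List (Int × Int)) (hnd : bs.Nodup) (hfresh : ∀ b ∈ bs, (a, b) ∉ acc) :
    bs.foldl (fun acc b => if P b then PySem.Set.add acc (a, b) else acc) acc
      = acc ++ (bs.filter P).map (fun b => (a, b)) := by
  induction bs generalizing acc with
  | nil => simp
  | cons b t ih =>
    rcases List.nodup_cons.1 hnd with ⟨hb, hndt⟩
    simp only [List.foldl_cons]
    by_cases hP : P b
    · rw [if_pos hP, PySem.Set.add_of_not_mem (hfresh b (List.mem_cons_self ..)),
        ih _ hndt (by
          intro b' hb'
          simp only [List.mem_append, List.mem_singleton, not_or]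
          refine ⟨hfresh b' (List.mem_cons_of_mem _ hb'), ?_⟩
          simp only [Prod.mk.injEq, not_and]
          rintro - rfl
          exact hb hb')]
      simp [hP]
    · rw [if_neg hP, ih _ hndt (fun b' hb' => hfresh b' (List.mem_cons_of_mem _ hb'))]
      simp [hP]

-- A's outer loop over a: the whole nested fold is the flatMap of surviving pairs
theorem pv_outer_fold (as bs : List Int) (P : Int → Int → Bool)
    (acc : List (Int × Int)) (hndA : as.Nodup) (hndB : bs.Nodup)
    (hfresh : ∀ a ∈ as, ∀ b, (a, b) ∉ acc) :
    as.foldl (fun acc a =>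
        bs.foldl (fun acc b => if P a b then PySem.Set.add acc (a, b) else acc) acc) acc
      = acc ++ as.flatMap (fun a => (bs.filter (P a)).map (fun b => (a, b))) := by
  induction as generalizing acc with
  | nil => simp
  | cons a t ih =>
    rcases List.nodup_cons.1 hndA with ⟨ha, hndt⟩
    simp only [List.foldl_cons]
    rw [pv_inner_fold bs (P a) a acc hndB (fun b hb => hfresh a (List.mem_cons_self ..) b),
      ih _ hndt (by
        intro a' ha' b
        simp only [List.mem_append, List.mem_map, not_or]
        refine ⟨hfresh a' (List.mem_cons_of_mem _ ha') b, ?_⟩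
        rintro ⟨b', -, hb'⟩
        injection hb' with h1 h2
        exact ha (h1 ▸ ha'))]
    simp [List.flatMap_cons]

-- A's per-pair body in normalized if-then-add form
theorem pv_body_eq (x y z : Int) (a b : Int) (ha : 1 ≤ a) (surv : List (Int × Int)) :
    (if 1 < Int.gcd a b then surv
     else
       let killed := (pvMods.zip (pvResZ z)).any (fun ms =>
         ! PySem.Set.contains ms.2 ((pvPow a x ms.1 + pvPow b y ms.1) % ms.1))
       if killed then surv else PySem.Set.add surv (a, b)) =
    (if (decide (Int.gcd a b = 1) && pvMods.all (fun m => pvOk x y z m (a, b))) = true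
     then PySem.Set.add surv (a, b) else surv) := by
  have hz : pvMods.zip (pvResZ z) = pvMods.map (fun m =>
      (m, PySem.Set.ofList ((PySem.List.pyRange 0 m 1).map (fun r => pvPow r z m)))) :=
    pv_zip_map_self pvMods _
  rw [hz]
  simp only [List.any_map, Function.comp_def]
  by_cases hg : Int.gcd a b = 1
  · rw [if_neg (by omega)]
    show (if (pvMods.any fun m => !pvOk x y z m (a, b)) = true then surv
          else PySem.Set.add surv (a, b)) = _
    rw [show (pvMods.any fun m => !pvOk x y z m (a, b))
        = !pvMods.all (fun m => pvOk x y z m (a, b)) by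
      simp [List.all_eq_not_any_not]]
    cases h : pvMods.all (fun m => pvOk x y z m (a, b)) <;> simp [hg]
  · have h0 : Int.gcd a b ≠ 0 := fun h => by
      rcases Int.gcd_eq_zero_iff.1 h with ⟨rfl, -⟩; omega
    rw [if_pos (by omega)]
    simp [hg]

-- A's port computes the canonical list
theorem pv_A_eq_canon (x y z A_max B_max : Int) :
    get_python_survivors x y z A_max B_max = pvCanon x y z A_max B_max := by
  unfold get_python_survivors pvCanon
  have hstep : ∀ (surv : List (Int × Int)) (a : Int), a ∈ PySem.List.pyRange 1 (A_max + 1) 1 →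
      (PySem.List.pyRange 1 (B_max + 1) 1).foldl (fun survivors B =>
        if 1 < Int.gcd a B then survivors
        else
          let killed := (pvMods.zip (pvResZ z)).any (fun ms =>
            ! PySem.Set.contains ms.2 ((pvPow a x ms.1 + pvPow B y ms.1) % ms.1))
          if killed then survivors else PySem.Set.add survivors (a, B)) surv
      = (PySem.List.pyRange 1 (B_max + 1) 1).foldl (fun survivors B =>
          if (decide (Int.gcd a B = 1) && pvMods.all (fun m => pvOk x y z m (a, B))) = true
          then PySem.Set.add survivors (a, B) else survivors) surv := by
    intro surv a hmem
    exact PySem.List.foldl_congr_mem _ _ _ _ (fun acc b _ =>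
      pv_body_eq x y z a b ((PySem.List.mem_pyRange_one.1 hmem).1) acc)
  rw [PySem.List.foldl_congr_mem _ _ _ _ hstep]
  exact pv_outer_fold _ _ _ _ (PySem.List.nodup_pyRange_one _ _) (PySem.List.nodup_pyRange_one _ _)
    (by intro a _ b h; simp [PySem.Set.empty] at h)

-- the canonical list has no duplicates
theorem pv_nodup_flatMap (as bs : List Int) (P : Int → Int → Bool)
    (hA : as.Nodup) (hB : bs.Nodup) :
    (as.flatMap (fun a => ((bs.filter (P a)).map (fun b => (a, b))))).Nodup := by
  induction as with
  | nil => simp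
  | cons a t ih =>
    rcases List.nodup_cons.1 hA with ⟨ha, ht⟩
    rw [List.flatMap_cons, List.nodup_append]
    refine ⟨(hB.filter _).map (fun b b' h => by injection h), ih ht, ?_⟩
    intro p hp q hq
    rcases List.mem_map.1 hp with ⟨b, -, rfl⟩
    rcases List.mem_flatMap.1 hq with ⟨a', ha', hq2⟩
    rcases List.mem_map.1 hq2 with ⟨b', -, rfl⟩
    intro hpq
    injection hpq with h1 h2
    exact ha (h1 ▸ ha')

theorem pv_canon_nodup (x y z A_max B_max : Int) : (pvCanon x y z A_max B_max).Nodup :=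
  pv_nodup_flatMap _ _ _ (PySem.List.nodup_pyRange_one _ _) (PySem.List.nodup_pyRange_one _ _)

-- filter distributes over the flatMap building the pair list
theorem pv_filter_flatMap (l : List Int) (f : Int → List (Int × Int)) (q : Int × Int → Bool) :
    (l.flatMap f).filter q = l.flatMap (fun a => (f a).filter q) := by
  induction l with
  | nil => rfl
  | cons a t ih => simp [List.flatMap_cons, List.filter_append, ih]

-- B's port computes the canonical list too
theorem pv_B_eq_canon (x y z A_max B_max : Int) :
    get_python_survivors_alt x y z A_max B_max = pvCanon x y z A_max B_max := by
  simp only [get_python_survivors_alt]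
  rw [PySem.List.foldl_congr_mem _ _ _ _ (fun pairs m _ => pv_pass_eq x y z m pairs),
    pv_foldl_filter pvMods (fun m p => pvOk x y z m p), pv_filter_flatMap]
  have hcanon : ((PySem.List.pyRange 1 (A_max + 1) 1).flatMap (fun a =>
      (((PySem.List.pyRange 1 (B_max + 1) 1).filter (fun b => Int.gcd a b = 1)).map
        (fun b => (a, b))).filter (fun p => pvMods.all (fun m => pvOk x y z m p))))
      = pvCanon x y z A_max B_max := by
    unfold pvCanon
    refine congrArg (fun f => List.flatMap f (PySem.List.pyRange 1 (A_max + 1) 1))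
      (funext fun a => ?_)
    rw [List.filter_map, List.filter_filter]
    apply congrArg
    apply List.filter_congr
    intro b _
    simp [Function.comp, Bool.and_comm]
  rw [hcanon]
  exact PySem.Set.ofList_eq_self_of_nodup _ (pv_canon_nodup x y z A_max B_max)

-- ===== VERDICT =====
theorem get_python_survivors_spec : Claim_equal_get_python_survivors := by
  intro x y z A_max B_max _ _
  unfold Spec_get_python_survivors
  rw [pv_A_eq_canon, pv_B_eq_canon]
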